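-- pv_equiv track=rewrite | github.com/matthew-brett/psych-214-fall-2016 | tools/proc_rst.py | process_rst
-- ===== SOURCE A (Python) =====
-- SECTION_CHARS=r"!\"#$%&'()*+,-./:;<=>?@[\]^_`{|}~"
--
-- def is_section_line(line):
--     if line == '':
--         return False
--     char0 = line[0]
--     if char0 not in SECTION_CHARS:
--         return False
--     return all(c == char0 for c in line.strip())
--
-- def process_rst(contents):
--     exercise_contents = []
--     state = 'rest'
--     underline_char = None
--     for line in contents.splitlines(True):
--         sline = line.strip()
--         if state == 'doctest':
--             if sline == '':
--                 state = 'rest'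
--             continue
--         if state == 'rest':
--             if sline.startswith('>>> '):
--                 state = 'doctest'
--                 continue
--             if underline_char is None and is_section_line(line):
--                 state = 'title'
--                 underline_char = line[0]
--                 continue
--             exercise_contents.append(line)
--         elif state == 'title':  # Knock of header
--             state = 'post-title'
--         elif state == 'post-title':
--             assert is_section_line(line)
--             state = 'rest'
--     return ''.join(exercise_contents), underline_char
-- ===== SOURCE B (Python) =====
-- SECTION_CHARS = r"!\"#$%&'()*+,-./:;<=>?@[\]^_`{|}~"
--
--
-- def is_section_line(line):
--     if line == '':
--         return False
--     char0 = line[0]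
--     if char0 not in SECTION_CHARS:
--         return False
--     return all(c == char0 for c in line.strip())
--
--
-- def process_rst(contents):
--     lines = contents.splitlines(True)
--     n = len(lines)
--     out = []
--     underline_char = None
--     i = 0
--     while i < n:
--         line = lines[i]
--         if line.strip().startswith('>>> '):
--             # skip the doctest block up to (and including) the next blank line
--             i += 1
--             while i < n and lines[i].strip() != '':
--                 i += 1
--             i += 1
--             continue
--         if underline_char is None and is_section_line(line):
--             underline_char = line[0]
--             if i + 2 < n:
--                 assert is_section_line(lines[i + 2])
--             i += 3
--             continue
--         out.append(line)
--         i += 1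
--     return ''.join(out), underline_char
-- ===== Notes on version B (the rewrite author's own statement) =====
-- stated objective: alternative
-- what changed: Replaced A's four-string state machine folded over every line by an index-driven scanner that consumes doctest blocks with an inner skip loop and titles with a single i+=3 jump, so no state variable survives between iterations.
import Mathlib
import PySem

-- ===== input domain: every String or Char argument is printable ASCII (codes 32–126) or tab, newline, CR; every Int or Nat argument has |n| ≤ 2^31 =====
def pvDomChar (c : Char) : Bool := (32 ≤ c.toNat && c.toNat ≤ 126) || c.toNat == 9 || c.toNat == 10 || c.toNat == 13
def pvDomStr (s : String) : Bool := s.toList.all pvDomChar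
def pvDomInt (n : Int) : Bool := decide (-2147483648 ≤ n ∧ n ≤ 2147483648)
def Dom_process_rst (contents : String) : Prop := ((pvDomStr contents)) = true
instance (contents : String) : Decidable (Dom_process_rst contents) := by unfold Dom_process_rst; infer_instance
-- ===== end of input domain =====

-- B replaces A's four-string state machine by an index-driven scanner with inner skip loops (objective: alternative decomposition).
-- ===== PORT A =====

-- shared translation of str.splitlines(True) (keepends); exact on Dom, where the only line
-- breaks are '\n', '\r' and '\r\n'
def splitlinesKeepAux : List Char → List Char → List String
  | cur, [] => if cur = [] then [] else [String.ofList cur.reverse]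
  | cur, '\r' :: '\n' :: rest => String.ofList (cur.reverse ++ ['\r', '\n']) :: splitlinesKeepAux [] rest
  | cur, '\r' :: rest => String.ofList (cur.reverse ++ ['\r']) :: splitlinesKeepAux [] rest
  | cur, '\n' :: rest => String.ofList (cur.reverse ++ ['\n']) :: splitlinesKeepAux [] rest
  | cur, c :: rest => splitlinesKeepAux (c :: cur) rest

def splitlinesKeep (s : String) : List String := splitlinesKeepAux [] s.toList

def SECTION_CHARS : String := "!\"#$%&'()*+,-./:;<=>?@[\\]^_`{|}~"

-- 'char0 not in SECTION_CHARS': char0 is a 1-character string, so the substring test is char membership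
def is_section_line (line : String) : Bool :=
  if line = "" then false
  else
    match PySem.Str.pyGet? line 0 with
    | none => false  -- unreachable: line ≠ ""
    | some char0 =>
      if !(SECTION_CHARS.toList.contains char0) then false
      else (PySem.Str.strip line).toList.all (fun c => c == char0)

-- Python line[0] as an Option String (some, since the guard ensures line ≠ "")
def firstCharStr (line : String) : Option String :=
  (PySem.Str.pyGet? line 0).map (fun c => String.ofList [c])

-- A's for-loop over the lines, state ∈ {"rest","doctest","title","post-title"}
def aLoop : List String → List String → String → Option String → List String × Option String
  | [], ec, _, uc => (ec, uc)
  | line :: rest, ec, state, uc =>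
    let sline := PySem.Str.strip line
    if state = "doctest" then
      if sline = "" then aLoop rest ec "rest" uc else aLoop rest ec "doctest" uc
    else if state = "rest" then
      if PySem.Str.startswith sline ">>> " then aLoop rest ec "doctest" uc
      else if uc.isNone && is_section_line line then aLoop rest ec "title" (firstCharStr line)
      else aLoop rest (ec ++ [line]) state uc
    else if state = "title" then aLoop rest ec "post-title" uc
    else -- "post-title": Python asserts is_section_line line here (excluded by Pre_), then state = "rest"
      aLoop rest ec "rest" uc

def process_rst (contents : String) : String × Option String :=
  let r := aLoop (splitlinesKeep contents) [] "rest" none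
  (PySem.Str.join "" r.1, r.2)

-- ===== PORT B =====

-- inner while loop: first index j ≥ i with j = n or lines[j].strip() == ''
def skipBlank (lines : List String) (n i : Nat) : Nat :=
  if i < n then
    if PySem.Str.strip (lines.getD i "") = "" then i else skipBlank lines n (i + 1)
  else i
termination_by n - i

theorem skipBlank_ge (lines : List String) (n i : Nat) : i ≤ skipBlank lines n i := by
  fun_induction skipBlank lines n i with
  | case1 => omega
  | case2 _ _ _ ih => omega
  | case3 => omega

def bLoop (lines : List String) (n i : Nat) (out : List String) (uc : Option String) :
    List String × Option String :=
  if i < n then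
    if PySem.Str.startswith (PySem.Str.strip (lines.getD i "")) ">>> " then
      bLoop lines n (skipBlank lines n (i + 1) + 1) out uc
    else if uc.isNone && is_section_line (lines.getD i "") then
      -- Python asserts is_section_line(lines[i+2]) when i+2 < n (excluded by Pre_)
      bLoop lines n (i + 3) out (firstCharStr (lines.getD i ""))
    else bLoop lines n (i + 1) (out ++ [lines.getD i ""]) uc
  else (out, uc)
termination_by n - i
decreasing_by
  · have := skipBlank_ge lines n (i + 1); omega
  · omega
  · omega

def process_rst_alt (contents : String) : String × Option String :=
  let lines := splitlinesKeep contents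
  let r := bLoop lines lines.length 0 [] none
  (PySem.Str.join "" r.1, r.2)

-- ===== PRECONDITION & SPEC =====

-- the single assert of A, as a check over the lines of the input (structural, no state beyond
-- "inside a doctest block"): the FIRST section line visible outside a doctest block must either
-- have fewer than two following lines or be followed, two lines later, by another section line
def okUnderline : Bool → List String → Bool
  | _, [] => true
  | true, l :: rest => if PySem.Str.strip l = "" then okUnderline false rest else okUnderline true rest
  | false, l :: rest =>
    if PySem.Str.startswith (PySem.Str.strip l) ">>> " then okUnderline true rest
    else if is_section_line l then
      match rest with
      | [] => true
      | [_] => true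
      | _ :: u :: _ => is_section_line u
    else okUnderline false rest

-- Pre_ excludes exactly the inputs on which A's assert fails (AssertionError); B raises there too.
-- (Line endings are irrelevant to every check involved, so the library splitlines suffices here.)
def Pre_process_rst (contents : String) : Prop :=
  okUnderline false (PySem.Str.splitlines contents) = true
instance (contents : String) : Decidable (Pre_process_rst contents) := by
  unfold Pre_process_rst; infer_instance

def pvWitness_process_rst : String := "para\n>>> 1 + 1\n2\n\nTitle\n=====\ntext\n"

def Spec_process_rst (contents : String) (out : String × Option String) : Prop := out = process_rst_alt contents
instance (contents : String) (out : String × Option String) : Decidable (Spec_process_rst contents out) := by unfold Spec_process_rst; infer_instance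

-- ===== CLAIM (what is proved, stated in full; the proofs are below) =====
def Claim_equal_process_rst : Prop := ∀ (contents : String), Dom_process_rst contents → Pre_process_rst contents → Spec_process_rst contents (process_rst contents)

-- ===== LEMMAS AND PROOFS =====

-- skipping a doctest block: A's "doctest" state run from position j lands where skipBlank says
theorem aLoop_doctest (lines : List String) (j : Nat) (ec : List String) (uc : Option String) :
    aLoop (lines.drop j) ec "doctest" uc
      = aLoop (lines.drop (skipBlank lines lines.length j + 1)) ec "rest" uc := by
  fun_induction skipBlank lines lines.length j with
  | case1 i h hblank =>
    rw [List.getD_eq_getElem _ _ h] at hblank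
    rw [List.drop_eq_getElem_cons h]
    simp [aLoop, hblank]
  | case2 i h hblank ih =>
    rw [List.getD_eq_getElem _ _ h] at hblank
    rw [List.drop_eq_getElem_cons h]
    simp [aLoop, hblank, ih]
  | case3 i h =>
    have h1 : lines.drop i = [] := List.drop_eq_nil_of_le (by omega)
    have h2 : lines.drop (i + 1) = [] := List.drop_eq_nil_of_le (by omega)
    simp [aLoop, h1, h2]

-- the two lines after a first section line are consumed unconditionally ("title"/"post-title")
theorem aLoop_title (lines : List String) (i : Nat) (ec : List String) (uc : Option String) :
    aLoop (lines.drop (i + 1)) ec "title" uc = aLoop (lines.drop (i + 3)) ec "rest" uc := by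
  have h2 : lines.drop (i + 2) = (lines.drop (i + 1)).tail := List.tail_drop.symm
  have h3 : lines.drop (i + 3) = (lines.drop (i + 2)).tail := List.tail_drop.symm
  cases h1 : lines.drop (i + 1) with
  | nil =>
    rw [h1] at h2; rw [h2] at h3
    simp [aLoop, h3]
  | cons a tl =>
    rw [h1] at h2; rw [h2] at h3
    cases tl with
    | nil => simp [aLoop, h3]
    | cons b tl2 => simp [aLoop, h3]

-- main alignment: B's index scanner equals A's state machine on the remaining suffix
theorem bLoop_eq_aLoop (lines : List String) (i : Nat) (out : List String) (uc : Option String) :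
    bLoop lines lines.length i out uc = aLoop (lines.drop i) out "rest" uc := by
  fun_induction bLoop lines lines.length i out uc with
  | case1 i out uc h hdoc ih =>
    have hg : lines.getD i "" = lines[i] := List.getD_eq_getElem _ _ h
    simp only [hg] at hdoc ih ⊢
    rw [ih, ← aLoop_doctest, List.drop_eq_getElem_cons h]
    simp only [PySem.Str.startswith_eq, PySem.Str.toList_strip,
      show (">>> ").toList = ['>', '>', '>', ' '] from rfl] at hdoc
    simp [aLoop, hdoc]
  | case2 i out uc h hdoc htitle ih =>
    have hg : lines.getD i "" = lines[i] := List.getD_eq_getElem _ _ h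
    simp only [hg] at hdoc htitle ih ⊢
    rw [ih, ← aLoop_title, List.drop_eq_getElem_cons h]
    simp only [PySem.Str.startswith_eq, PySem.Str.toList_strip,
      show (">>> ").toList = ['>', '>', '>', ' '] from rfl] at hdoc
    simp only [Bool.and_eq_true, Option.isNone_iff_eq_none] at htitle
    simp [aLoop, hdoc, htitle.1, htitle.2]
  | case3 i out uc h hdoc htitle ih =>
    have hg : lines.getD i "" = lines[i] := List.getD_eq_getElem _ _ h
    simp only [hg] at hdoc htitle ih ⊢
    rw [ih, List.drop_eq_getElem_cons h]
    simp only [PySem.Str.startswith_eq, PySem.Str.toList_strip,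
      show (">>> ").toList = ['>', '>', '>', ' '] from rfl] at hdoc
    simp only [Bool.and_eq_true, Option.isNone_iff_eq_none, not_and] at htitle
    simp [aLoop, hdoc]
    intro h1 h2
    exact absurd h2 (htitle h1)
  | case4 i out uc h =>
    have h1 : lines.drop i = [] := List.drop_eq_nil_of_le (by omega)
    simp [aLoop, h1]

-- ===== VERDICT (by name: the statement is the Claim_ definition above) =====
theorem process_rst_spec : Claim_equal_process_rst := by
  intro contents _ _
  show process_rst contents = process_rst_alt contents
  unfold process_rst process_rst_alt
  simp only [bLoop_eq_aLoop, List.drop_zero]
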